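-- pv_equiv track=rewrite | github.com/betinakreiman/SetGame | MySetClass.py | lookForSetInTable
-- ===== SOURCE A (Python) =====
-- def isPotential(cOne, cTwo, cThree, property):
--     # input = card1, card2, card3, and a property (quantity, color, shape, filling)
--     # output = true or false
--     # function -> sees if cards are either all the same or all different in one property
--     # properties represented with number - (color = 0, quantity = 1, shape = 2, filling 3)
--
--     if cOne[property] == cTwo[property] and cOne[property] == cThree[property] and cTwo[property] == cThree[property]:
--         return True
--     elif cOne[property] != cTwo[property] and cOne[property]!= cThree[property] and cTwo[property] != cThree[property]:
--         return True
--     return False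
--
-- def isSet(cOne, cTwo, cThree):
--     # input = card1, card2, and card3
--     # output = true or false (is set or not)
--     # function -> checks if all the properties are either all the same or all different to find if set or not
--
--     if isPotential(cOne, cTwo, cThree, 0) and isPotential(cOne, cTwo, cThree, 1) and isPotential(cOne, cTwo, cThree, 2) and isPotential(cOne, cTwo, cThree, 3):
--         return True
--     return False
--
-- def lookForSetInTable(table):
--     # input = a table
--     # ouput =
--
--     numberOfCards = len(table)
--     for i in range(0, numberOfCards):
--         cardOne = table[i]
--         for j in range(i+1, numberOfCards):
--             cardTwo = table[j]
--             #ij = isTwin(i,j)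
--             # if ij == False:
--             for m in range(j+1, numberOfCards):
--                 cardThree = table[m]
--                     # im = isTwin(i,m)
--                     # jm = isTwin(j,m)
--                     # if im == False and jm == False:
--                         #if isTwin(i,j):
--                         #break
--                         #elif isTwin(i,m):
--                         #break
--                         #elif isTwin(j, m):
--                         #break
--                         #else
--                 checkset = isSet(cardOne, cardTwo, cardThree)
--                 if checkset:
--                     return'Set', cardOne, cardTwo, cardThree
-- ===== SOURCE B (Python) =====
-- # B: instead of scanning all m for every pair, pre-bucket every card index under the
-- # 16 "pattern keys" (each property either pinned to its value or free); for a pair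
-- # (x, y) the valid third cards are exactly the bucket of the pair's equality pattern,
-- # filtered by the all-different check on the unequal properties.
--
-- def _cell(a, b):
--     return a if a == b else None
--
-- def lookForSetInTable(table):
--     n = len(table)
--     if n < 3:
--         return None
--     buckets = {}
--     for idx in range(n):
--         card = table[idx]
--         c0, c1, c2, c3 = card[0], card[1], card[2], card[3]
--         keys = [(k0, k1, k2, k3)
--                 for k0 in (c0, None) for k1 in (c1, None)
--                 for k2 in (c2, None) for k3 in (c3, None)]
--         for key in keys:
--             buckets.setdefault(key, []).append(idx)
--     for i in range(n):
--         x = table[i]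
--         for j in range(i + 1, n):
--             y = table[j]
--             key = (_cell(x[0], y[0]), _cell(x[1], y[1]),
--                    _cell(x[2], y[2]), _cell(x[3], y[3]))
--             for m in buckets.get(key, []):
--                 if m > j and all(table[m][p] != x[p] and table[m][p] != y[p]
--                                  for p in range(4) if x[p] != y[p]):
--                     return 'Set', x, y, table[m]
--     return None
-- ===== Notes on version B (the rewrite author's own statement) =====
-- stated objective: alternative
-- what changed: Replaces the cubic triple loop testing isSet on every (i,j,m) with a precomputed pattern-bucket index (each card filed once under its 16 pinned/free property patterns); for each pair only the bucket of the pair's equality pattern is scanned, with a residual all-different check on the unequal properties.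
-- outside the precondition, e.g. on lookForSetInTable([[0], [0], [1]]): A returns None, B raises IndexError
import Mathlib
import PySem

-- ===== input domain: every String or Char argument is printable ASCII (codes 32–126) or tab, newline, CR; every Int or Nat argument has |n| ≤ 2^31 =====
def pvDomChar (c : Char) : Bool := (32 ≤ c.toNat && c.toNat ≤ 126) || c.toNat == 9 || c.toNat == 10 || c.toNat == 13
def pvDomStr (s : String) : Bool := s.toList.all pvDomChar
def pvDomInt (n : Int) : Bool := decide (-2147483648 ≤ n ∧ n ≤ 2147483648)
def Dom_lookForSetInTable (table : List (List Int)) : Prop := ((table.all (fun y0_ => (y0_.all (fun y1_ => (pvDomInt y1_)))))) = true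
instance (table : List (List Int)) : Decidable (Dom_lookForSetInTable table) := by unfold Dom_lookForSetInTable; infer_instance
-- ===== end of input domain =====

-- B replaces A's cubic triple loop with a pattern-bucket index (each card filed under its
-- 16 pinned/free property patterns); for a pair only the bucket of its equality pattern is
-- scanned, with a residual all-different check — an alternative algorithm, not proved faster.


-- ===== PORT A =====
def pvIsPotential (cOne cTwo cThree : List Int) (property : Int) : Bool :=
  if PySem.List.pyGetD cOne property 0 = PySem.List.pyGetD cTwo property 0 ∧
     PySem.List.pyGetD cOne property 0 = PySem.List.pyGetD cThree property 0 ∧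
     PySem.List.pyGetD cTwo property 0 = PySem.List.pyGetD cThree property 0 then true
  else if PySem.List.pyGetD cOne property 0 ≠ PySem.List.pyGetD cTwo property 0 ∧
          PySem.List.pyGetD cOne property 0 ≠ PySem.List.pyGetD cThree property 0 ∧
          PySem.List.pyGetD cTwo property 0 ≠ PySem.List.pyGetD cThree property 0 then true
  else false

def pvIsSet (cOne cTwo cThree : List Int) : Bool :=
  pvIsPotential cOne cTwo cThree 0 && pvIsPotential cOne cTwo cThree 1 &&
  pvIsPotential cOne cTwo cThree 2 && pvIsPotential cOne cTwo cThree 3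

def lookForSetInTable (table : List (List Int)) : Option (String × List Int × List Int × List Int) :=
  let numberOfCards : Int := PySem.List.len table
  (PySem.List.pyRange 0 numberOfCards 1).findSome? (fun i =>
    let cardOne := PySem.List.pyGetD table i []
    (PySem.List.pyRange (i + 1) numberOfCards 1).findSome? (fun j =>
      let cardTwo := PySem.List.pyGetD table j []
      (PySem.List.pyRange (j + 1) numberOfCards 1).findSome? (fun m =>
        let cardThree := PySem.List.pyGetD table m []
        let checkset := pvIsSet cardOne cardTwo cardThree
        if checkset then some ("Set", cardOne, cardTwo, cardThree) else none)))

-- ===== PORT B =====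
-- the 16 pattern keys of a card: each of the 4 properties pinned to its value or free (none)
def pvKeysOf (card : List Int) : List (Option Int × Option Int × Option Int × Option Int) :=
  let c0 := PySem.List.pyGetD card 0 0
  let c1 := PySem.List.pyGetD card 1 0
  let c2 := PySem.List.pyGetD card 2 0
  let c3 := PySem.List.pyGetD card 3 0
  [some c0, none].flatMap (fun k0 =>
    [some c1, none].flatMap (fun k1 =>
      [some c2, none].flatMap (fun k2 =>
        [some c3, none].map (fun k3 => (k0, k1, k2, k3)))))

def pvBuckets (table : List (List Int)) :
    PySem.Dict (Option Int × Option Int × Option Int × Option Int) (List Int) :=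
  (PySem.List.pyRange 0 (PySem.List.len table) 1).foldl (fun d idx =>
    (pvKeysOf (PySem.List.pyGetD table idx [])).foldl
      (fun d key => d.modify key [] (· ++ [idx])) d) PySem.Dict.empty

def pvCell (a b : Int) : Option Int := if a = b then some a else none

def pvThirdOk (x y z : List Int) : Bool :=
  (PySem.List.pyRange 0 4 1).all (fun p =>
    if PySem.List.pyGetD x p 0 = PySem.List.pyGetD y p 0 then true
    else decide (PySem.List.pyGetD z p 0 ≠ PySem.List.pyGetD x p 0 ∧
                 PySem.List.pyGetD z p 0 ≠ PySem.List.pyGetD y p 0))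

def lookForSetInTable_alt (table : List (List Int)) : Option (String × List Int × List Int × List Int) :=
  let n : Int := PySem.List.len table
  if n < 3 then none
  else
    let buckets := pvBuckets table
    (PySem.List.pyRange 0 n 1).findSome? (fun i =>
      let x := PySem.List.pyGetD table i []
      (PySem.List.pyRange (i + 1) n 1).findSome? (fun j =>
        let y := PySem.List.pyGetD table j []
        let key := (pvCell (PySem.List.pyGetD x 0 0) (PySem.List.pyGetD y 0 0),
                    pvCell (PySem.List.pyGetD x 1 0) (PySem.List.pyGetD y 1 0),
                    pvCell (PySem.List.pyGetD x 2 0) (PySem.List.pyGetD y 2 0),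
                    pvCell (PySem.List.pyGetD x 3 0) (PySem.List.pyGetD y 3 0))
        (buckets.getD key []).findSome? (fun m =>
          if j < m ∧ pvThirdOk x y (PySem.List.pyGetD table m []) = true
          then some ("Set", x, y, PySem.List.pyGetD table m []) else none)))

-- ===== PRECONDITION & SPEC =====
-- Pre_ excludes tables of ≥ 3 cards containing a card with fewer than 4 properties: on those
-- Python A either raises IndexError itself or returns None only by comparison short-circuit,
-- while B (which indexes every card's 4 properties up front) raises IndexError.
def Pre_lookForSetInTable (table : List (List Int)) : Prop :=
  table.length < 3 ∨ ∀ c ∈ table, 4 ≤ c.length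
instance (table : List (List Int)) : Decidable (Pre_lookForSetInTable table) := by
  unfold Pre_lookForSetInTable; infer_instance

def pvWitness_lookForSetInTable : List (List Int) := [[0, 1, 2, 0], [1, 1, 1, 1], [2, 2, 2, 2]]

def Spec_lookForSetInTable (table : List (List Int)) (out : Option (String × List Int × List Int × List Int)) : Prop := out = lookForSetInTable_alt table
instance (table : List (List Int)) (out : Option (String × List Int × List Int × List Int)) : Decidable (Spec_lookForSetInTable table out) := by unfold Spec_lookForSetInTable; infer_instance

-- ===== CLAIM (what is proved, stated in full; the proofs are below) =====
def Claim_equal_lookForSetInTable : Prop := ∀ (table : List (List Int)), Dom_lookForSetInTable table → Pre_lookForSetInTable table → Spec_lookForSetInTable table (lookForSetInTable table)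

-- ===== LEMMAS AND PROOFS =====

theorem keys_expand (card : List Int) :
    pvKeysOf card =
      [some (PySem.List.pyGetD card 0 0), none].flatMap (fun k0 =>
        [some (PySem.List.pyGetD card 1 0), none].flatMap (fun k1 =>
          [some (PySem.List.pyGetD card 2 0), none].flatMap (fun k2 =>
            [some (PySem.List.pyGetD card 3 0), none].map (fun k3 => (k0, k1, k2, k3))))) := rfl

theorem pvKeysOf_nodup (card : List Int) : (pvKeysOf card).Nodup := by
  rw [keys_expand]
  simp only [List.flatMap_cons, List.flatMap_nil, List.map_cons, List.map_nil, List.append_nil,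
    List.nil_append, List.cons_append]
  refine List.Nodup.of_map (fun k => (k.1.isSome, k.2.1.isSome, k.2.2.1.isSome, k.2.2.2.isSome)) ?_
  simp only [List.map_cons, List.map_nil, Option.isSome_some, Option.isSome_none]
  decide

theorem mem_pvKeysOf (z : List Int) (k0 k1 k2 k3 : Option Int) :
    (k0, k1, k2, k3) ∈ pvKeysOf z ↔
      (k0 = some (PySem.List.pyGetD z 0 0) ∨ k0 = none) ∧
      (k1 = some (PySem.List.pyGetD z 1 0) ∨ k1 = none) ∧
      (k2 = some (PySem.List.pyGetD z 2 0) ∨ k2 = none) ∧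
      (k3 = some (PySem.List.pyGetD z 3 0) ∨ k3 = none) := by
  rw [keys_expand]
  simp only [List.mem_flatMap, List.mem_map, List.mem_cons, List.not_mem_nil, or_false,
    Prod.mk.injEq]
  constructor
  · rintro ⟨a0, h0, a1, h1, a2, h2, a3, h3, e0, e1, e2, e3⟩
    subst e0; subst e1; subst e2; subst e3
    exact ⟨h0, h1, h2, h3⟩
  · rintro ⟨h0, h1, h2, h3⟩
    exact ⟨k0, h0, k1, h1, k2, h2, k3, h3, rfl, rfl, rfl, rfl⟩

theorem findSome?_filter {α β : Type} (p : α → Bool) (f : α → Option β) (l : List α) :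
    (l.filter p).findSome? f = l.findSome? (fun x => if p x then f x else none) := by
  induction l with
  | nil => rfl
  | cons a t ih =>
    by_cases h : p a
    · simp [List.filter_cons, h, List.findSome?_cons, ih]
    · simp [List.filter_cons, h, List.findSome?_cons, ih]

theorem findSome?_congr_mem {α β : Type} {f g : α → Option β} {l : List α}
    (h : ∀ x ∈ l, f x = g x) : l.findSome? f = l.findSome? g := by
  induction l with
  | nil => rfl
  | cons a t ih =>
    simp only [List.findSome?_cons, h a (by simp)]
    cases g a with
    | some b => rfl
    | none => exact ih (fun x hx => h x (by simp [hx]))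

-- fold of per-key appends over a duplicate-free key list, read back at k
theorem fold_modify_getD (idx : Int)
    (ks : List (Option Int × Option Int × Option Int × Option Int)) (hnd : ks.Nodup)
    (d : PySem.Dict (Option Int × Option Int × Option Int × Option Int) (List Int))
    (k : Option Int × Option Int × Option Int × Option Int) :
    (ks.foldl (fun d key => d.modify key [] (· ++ [idx])) d).getD k [] =
      d.getD k [] ++ (if k ∈ ks then [idx] else []) := by
  induction ks generalizing d with
  | nil => simp
  | cons a t ih =>
    simp only [List.foldl_cons]
    rw [ih (List.Nodup.of_cons hnd)]
    by_cases hk : k = a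
    · subst hk
      have hkt : k ∉ t := (List.nodup_cons.mp hnd).1
      rw [PySem.Dict.getD_modify_self]
      simp [hkt]
    · rw [PySem.Dict.getD_modify_of_ne]
      · simp [hk]
      · exact hk

theorem fold_table_getD (table : List (List Int)) (l : List Int)
    (d : PySem.Dict (Option Int × Option Int × Option Int × Option Int) (List Int))
    (k : Option Int × Option Int × Option Int × Option Int) :
    (l.foldl (fun d idx =>
        (pvKeysOf (PySem.List.pyGetD table idx [])).foldl
          (fun d key => d.modify key [] (· ++ [idx])) d) d).getD k [] =
      d.getD k [] ++ l.filter (fun idx => decide (k ∈ pvKeysOf (PySem.List.pyGetD table idx []))) := by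
  induction l generalizing d with
  | nil => simp
  | cons a t ih =>
    simp only [List.foldl_cons, List.filter_cons]
    rw [ih, fold_modify_getD a (pvKeysOf (PySem.List.pyGetD table a [])) (pvKeysOf_nodup _)]
    by_cases hmem : k ∈ pvKeysOf (PySem.List.pyGetD table a [])
    · simp [hmem]
    · simp [hmem]

theorem pvBuckets_getD (table : List (List Int))
    (k : Option Int × Option Int × Option Int × Option Int) :
    (pvBuckets table).getD k [] =
      (PySem.List.pyRange 0 (PySem.List.len table) 1).filter
        (fun idx => decide (k ∈ pvKeysOf (PySem.List.pyGetD table idx []))) := by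
  unfold pvBuckets
  rw [fold_table_getD]
  simp

theorem pot_core (a b c : Int) :
    (if a = b ∧ a = c ∧ b = c then true else if a ≠ b ∧ a ≠ c ∧ b ≠ c then true else false) = true ↔
      (((if a = b then some a else none) = some c ∨ (if a = b then some a else none) = none) ∧
       (if a = b then true else decide (c ≠ a ∧ c ≠ b)) = true) := by
  by_cases hab : a = b <;> by_cases hac : a = c <;> by_cases hbc : b = c <;>
    simp_all <;> tauto

theorem pot_split (x y z : List Int) (p : Int) :
    pvIsPotential x y z p = true ↔
      ((pvCell (PySem.List.pyGetD x p 0) (PySem.List.pyGetD y p 0) = some (PySem.List.pyGetD z p 0) ∨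
        pvCell (PySem.List.pyGetD x p 0) (PySem.List.pyGetD y p 0) = none) ∧
       (if PySem.List.pyGetD x p 0 = PySem.List.pyGetD y p 0 then true
        else decide (PySem.List.pyGetD z p 0 ≠ PySem.List.pyGetD x p 0 ∧
                     PySem.List.pyGetD z p 0 ≠ PySem.List.pyGetD y p 0)) = true) := by
  simp only [pvIsPotential, pvCell]
  exact pot_core _ _ _

theorem pvIsSet_iff (x y z : List Int) :
    pvIsSet x y z = true ↔
      ((pvCell (PySem.List.pyGetD x 0 0) (PySem.List.pyGetD y 0 0),
        pvCell (PySem.List.pyGetD x 1 0) (PySem.List.pyGetD y 1 0),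
        pvCell (PySem.List.pyGetD x 2 0) (PySem.List.pyGetD y 2 0),
        pvCell (PySem.List.pyGetD x 3 0) (PySem.List.pyGetD y 3 0)) ∈ pvKeysOf z ∧
       pvThirdOk x y z = true) := by
  rw [mem_pvKeysOf]
  have hr : PySem.List.pyRange 0 4 1 = [0, 1, 2, 3] := by decide
  simp only [pvIsSet, pvThirdOk, hr, List.all_cons, List.all_nil, Bool.and_eq_true,
    Bool.and_true, pot_split]
  tauto

theorem scan_eq (table : List (List Int)) (x y : List Int) (j : Int)
    (hj : 0 ≤ j) (hjn : j + 1 ≤ PySem.List.len table) :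
    List.findSome? (fun m =>
        if j < m ∧ pvThirdOk x y (PySem.List.pyGetD table m []) = true
        then some (("Set", x, y, PySem.List.pyGetD table m []) :
          String × List Int × List Int × List Int) else none)
      ((pvBuckets table).getD
        (pvCell (PySem.List.pyGetD x 0 0) (PySem.List.pyGetD y 0 0),
         pvCell (PySem.List.pyGetD x 1 0) (PySem.List.pyGetD y 1 0),
         pvCell (PySem.List.pyGetD x 2 0) (PySem.List.pyGetD y 2 0),
         pvCell (PySem.List.pyGetD x 3 0) (PySem.List.pyGetD y 3 0)) [])
    = List.findSome? (fun m =>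
        if pvIsSet x y (PySem.List.pyGetD table m []) = true
        then some ("Set", x, y, PySem.List.pyGetD table m []) else none)
      (PySem.List.pyRange (j + 1) (PySem.List.len table) 1) := by
  rw [pvBuckets_getD, findSome?_filter]
  rw [PySem.List.pyRange_one_append 0 (j + 1) (PySem.List.len table) (by omega) hjn,
    List.findSome?_append]
  have h1 : List.findSome? (fun m =>
      if decide ((pvCell (PySem.List.pyGetD x 0 0) (PySem.List.pyGetD y 0 0),
         pvCell (PySem.List.pyGetD x 1 0) (PySem.List.pyGetD y 1 0),
         pvCell (PySem.List.pyGetD x 2 0) (PySem.List.pyGetD y 2 0),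
         pvCell (PySem.List.pyGetD x 3 0) (PySem.List.pyGetD y 3 0)) ∈
           pvKeysOf (PySem.List.pyGetD table m []))
      then (if j < m ∧ pvThirdOk x y (PySem.List.pyGetD table m []) = true
        then some (("Set", x, y, PySem.List.pyGetD table m []) :
          String × List Int × List Int × List Int) else none) else none)
      (PySem.List.pyRange 0 (j + 1) 1) = none := by
    rw [List.findSome?_eq_none_iff]
    intro m hm
    rw [PySem.List.mem_pyRange_one] at hm
    have hnot : ¬ j < m := by omega
    simp [hnot]
  rw [h1, Option.none_or]
  apply findSome?_congr_mem
  intro m hm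
  rw [PySem.List.mem_pyRange_one] at hm
  have hjm : j < m := by omega
  by_cases hmem : (pvCell (PySem.List.pyGetD x 0 0) (PySem.List.pyGetD y 0 0),
      pvCell (PySem.List.pyGetD x 1 0) (PySem.List.pyGetD y 1 0),
      pvCell (PySem.List.pyGetD x 2 0) (PySem.List.pyGetD y 2 0),
      pvCell (PySem.List.pyGetD x 3 0) (PySem.List.pyGetD y 3 0)) ∈
        pvKeysOf (PySem.List.pyGetD table m []) <;>
    by_cases ht : pvThirdOk x y (PySem.List.pyGetD table m []) = true <;>
      simp [hmem, ht, hjm, pvIsSet_iff]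

-- ===== VERDICT (by name: the statement is the Claim_ definition above) =====
theorem lookForSetInTable_spec : Claim_equal_lookForSetInTable := by
  intro table _hdom _hpre
  unfold Spec_lookForSetInTable
  unfold lookForSetInTable lookForSetInTable_alt
  by_cases h3 : (PySem.List.len table : Int) < 3
  · simp only [if_pos h3]
    rw [List.findSome?_eq_none_iff]
    intro i hi
    rw [PySem.List.mem_pyRange_one] at hi
    rw [List.findSome?_eq_none_iff]
    intro j hj
    rw [PySem.List.mem_pyRange_one] at hj
    rw [PySem.List.pyRange_one_eq_nil (by omega)]
    rfl
  · simp only [if_neg h3]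
    apply findSome?_congr_mem
    intro i hi
    rw [PySem.List.mem_pyRange_one] at hi
    apply findSome?_congr_mem
    intro j hj
    rw [PySem.List.mem_pyRange_one] at hj
    exact (scan_eq table _ _ j (by omega) (by omega)).symm
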